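-- pv_equiv track=rewrite | github.com/pypi-data/pypi-mirror-175 | packages/a-pandas-ex-vertical-to-horizontal/a_pandas_ex_vertical_to_horizontal-0.10.tar.gz/a_pandas_ex_vertical_to_horizontal-0.10/a_pandas_ex_vertical_to_horizontal/__init__.py | how_many_to_add_until_even
-- ===== SOURCE A (Python) =====
-- def how_many_to_add_until_even(n1: int, n2: int) -> int:
--     number1original = n1
--     number2original = n2
--     number1 = number1original
--     number2 = number2original
--     while divmod(number1, number2)[-1] != 0:
--         number1 += 1
--     toadd = number1 - number1original
--     return toadd
-- ===== SOURCE B (Python) =====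
-- def how_many_to_add_until_even(n1: int, n2: int) -> int:
--     return (-n1) % abs(n2)
-- ===== Notes on version B (the rewrite author's own statement) =====
-- stated objective: faster
-- what changed: replaces the increment-until-divisible loop with the closed-form modular formula (-n1) % abs(n2)
import Mathlib
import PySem

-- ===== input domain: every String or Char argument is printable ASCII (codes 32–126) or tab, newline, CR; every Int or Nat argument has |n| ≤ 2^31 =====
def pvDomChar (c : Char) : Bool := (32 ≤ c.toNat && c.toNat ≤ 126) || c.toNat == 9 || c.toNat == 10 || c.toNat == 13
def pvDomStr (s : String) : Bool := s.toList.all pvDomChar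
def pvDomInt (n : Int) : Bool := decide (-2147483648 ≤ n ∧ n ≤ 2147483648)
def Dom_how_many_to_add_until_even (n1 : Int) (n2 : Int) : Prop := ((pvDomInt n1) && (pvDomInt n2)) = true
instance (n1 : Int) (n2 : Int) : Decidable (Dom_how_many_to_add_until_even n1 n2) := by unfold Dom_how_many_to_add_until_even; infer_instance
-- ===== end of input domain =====

-- B replaces A's increment-until-divisible loop by the closed-form (-n1) % abs(n2) (measured asymptotically faster).

-- ===== PORT A =====
-- A's while loop: increment number1 until number1 % number2 == 0.  The loop runs at most
-- |n2| - 1 iterations when n2 ≠ 0, so fuel |n2|.natAbs makes the same computation total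
-- (it is exhausted only when n2 = 0, where Python raises ZeroDivisionError).
def pvLoopA : Nat → Int → Int → Int
  | 0, number1, _ => number1
  | f + 1, number1, number2 =>
    if PySem.Int.mod number1 number2 ≠ 0 then pvLoopA f (number1 + 1) number2 else number1

def how_many_to_add_until_even (n1 : Int) (n2 : Int) : Int :=
  pvLoopA n2.natAbs n1 n2 - n1

-- ===== PORT B =====
def how_many_to_add_until_even_alt (n1 : Int) (n2 : Int) : Int :=
  PySem.Int.mod (-n1) ((n2.natAbs : Int))

-- ===== PRECONDITION & SPEC =====
-- Pre_ excludes n2 = 0, on which A's divmod raises ZeroDivisionError (B also raises there).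
def Pre_how_many_to_add_until_even (n1 : Int) (n2 : Int) : Prop := n2 ≠ 0
instance (n1 : Int) (n2 : Int) : Decidable (Pre_how_many_to_add_until_even n1 n2) := by unfold Pre_how_many_to_add_until_even; infer_instance
def pvWitness_how_many_to_add_until_even : Int × Int := (7, 3)

def Spec_how_many_to_add_until_even (n1 : Int) (n2 : Int) (out : Int) : Prop := out = how_many_to_add_until_even_alt n1 n2
instance (n1 : Int) (n2 : Int) (out : Int) : Decidable (Spec_how_many_to_add_until_even n1 n2 out) := by unfold Spec_how_many_to_add_until_even; infer_instance

-- ===== CLAIM (what is proved, stated in full; the proofs are below) =====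
def Claim_equal_how_many_to_add_until_even : Prop := ∀ (n1 : Int) (n2 : Int), Dom_how_many_to_add_until_even n1 n2 → Pre_how_many_to_add_until_even n1 n2 → Spec_how_many_to_add_until_even n1 n2 (how_many_to_add_until_even n1 n2)

-- ===== LEMMAS AND PROOFS =====

-- A's loop condition is equivalent to non-divisibility by |n2|.
theorem pv_mod_zero_iff (n1 n2 : Int) :
    PySem.Int.mod n1 n2 = 0 ↔ (-n1) % ((n2.natAbs : Int)) = 0 := by
  rw [PySem.Int.mod_eq_zero_iff_dvd]
  constructor
  · intro hd
    exact Int.emod_eq_zero_of_dvd (by simpa [Int.natAbs_dvd, Int.dvd_neg] using hd)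
  · intro he
    simpa [Int.natAbs_dvd, Int.dvd_neg] using Int.dvd_of_emod_eq_zero he

-- Loop invariant: with enough fuel, the loop stops at n1 + ((-n1) % |n2|).
theorem pvLoopA_eq (f : Nat) (n2 : Int) (h : n2 ≠ 0) :
    ∀ n1 : Int, ((-n1) % ((n2.natAbs : Int))).toNat ≤ f →
      pvLoopA f n1 n2 = n1 + (-n1) % ((n2.natAbs : Int)) := by
  have hm : 0 < ((n2.natAbs : Int)) := by
    have := Int.natAbs_pos.mpr h; exact_mod_cast this
  induction f with
  | zero =>
    intro n1 hf
    have h0 : 0 ≤ (-n1) % ((n2.natAbs : Int)) := Int.emod_nonneg _ (by omega)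
    have : (-n1) % ((n2.natAbs : Int)) = 0 := by omega
    simp only [pvLoopA]
    omega
  | succ f ih =>
    intro n1 hf
    by_cases hz : PySem.Int.mod n1 n2 = 0
    · have h0 : (-n1) % ((n2.natAbs : Int)) = 0 := (pv_mod_zero_iff n1 n2).mp hz
      simp only [pvLoopA]
      rw [if_neg (not_not_intro hz)]
      omega
    · have h0 : (-n1) % ((n2.natAbs : Int)) ≠ 0 := fun e => hz ((pv_mod_zero_iff n1 n2).mpr e)
      have hpos : 0 < (-n1) % ((n2.natAbs : Int)) :=
        lt_of_le_of_ne (Int.emod_nonneg _ (by omega)) (Ne.symm h0)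
      have hstep : (-(n1 + 1)) % ((n2.natAbs : Int)) = (-n1) % ((n2.natAbs : Int)) - 1 := by
        have hlt : (-n1) % ((n2.natAbs : Int)) < (n2.natAbs : Int) := Int.emod_lt_of_pos _ hm
        have h1 : (1 : Int) % ((n2.natAbs : Int)) = 1 := Int.emod_eq_of_lt (by omega) (by omega)
        rw [show -(n1 + 1) = -n1 - 1 by ring, Int.sub_emod, h1, Int.emod_eq_of_lt (by omega) (by omega)]
      have := ih (n1 + 1) (by omega)
      rw [hstep] at this
      simp only [pvLoopA, if_pos hz]
      rw [this]; ring

-- ===== VERDICT (by name: the statement is the Claim_ definition above) =====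
theorem how_many_to_add_until_even_spec : Claim_equal_how_many_to_add_until_even := by
  intro n1 n2 _ hpre
  have hm : 0 < ((n2.natAbs : Int)) := by
    have := Int.natAbs_pos.mpr hpre; exact_mod_cast this
  have hlt : (-n1) % ((n2.natAbs : Int)) < (n2.natAbs : Int) := Int.emod_lt_of_pos _ hm
  have hge : 0 ≤ (-n1) % ((n2.natAbs : Int)) := Int.emod_nonneg _ (by omega)
  have hfuel : ((-n1) % ((n2.natAbs : Int))).toNat ≤ n2.natAbs := by omega
  unfold Spec_how_many_to_add_until_even how_many_to_add_until_even how_many_to_add_until_even_alt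
  rw [pvLoopA_eq n2.natAbs n2 hpre n1 hfuel, PySem.Int.mod_eq_emod_of_pos hm]
  ring
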